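-- pv_equiv track=rewrite | github.com/showe93/NFLKickingData | FGPercentageStats.py | KickerPerformanceNameList
-- ===== SOURCE A (Python) =====
-- def KickerPerformanceNameList(PoorKickersList, GoodKickersList, EliteKickersList):
--     kickerList = [PoorKickersList, GoodKickersList, EliteKickersList]
--     table = [
--         ['Below -1SD', 'Between -1SD and 1SD', 'Above 1SD']
--     ]
--     loops = 0
--     row = 0
--     if len(EliteKickersList) > len(GoodKickersList) and len(EliteKickersList) > len(PoorKickersList):
--         loops = len(EliteKickersList)
--     elif len(GoodKickersList) > len(PoorKickersList):
--         loops = len(GoodKickersList)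
--     else:
--         loops = len(PoorKickersList)
--     for nameslist in range(loops):
--         entry = []
--         i = 0
--         try:
--             entry.append(kickerList[i][row])
--         except IndexError:
--             entry.append(" ")
--         i = 1
--         try:
--             entry.append(kickerList[i][row])
--         except IndexError:
--             entry.append(" ")
--         i = 2
--         try:
--             entry.append(kickerList[i][row])
--         except IndexError:
--             entry.append(" ")
--         table.append(entry)
--         row += 1
--     return table
-- ===== SOURCE B (Python) =====
-- _SENTINEL = object()
--
-- def KickerPerformanceNameList(PoorKickersList, GoodKickersList, EliteKickersList):
--     header = ['Below -1SD', 'Between -1SD and 1SD', 'Above 1SD']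
--     rows = []
--     its = (iter(PoorKickersList), iter(GoodKickersList), iter(EliteKickersList))
--     while True:
--         vals = [next(it, _SENTINEL) for it in its]
--         if all(v is _SENTINEL for v in vals):
--             break
--         rows.append([" " if v is _SENTINEL else v for v in vals])
--     return [header] + rows
-- ===== Notes on version B (the rewrite author's own statement) =====
-- stated objective: simpler
-- what changed: Replaces A's three-way max-length computation, indexed counter loop and try/except IndexError padding with a parallel iterator sweep (a hand-rolled zip_longest with fill ' ') that stops when all three iterators are exhausted.
import Mathlib
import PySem

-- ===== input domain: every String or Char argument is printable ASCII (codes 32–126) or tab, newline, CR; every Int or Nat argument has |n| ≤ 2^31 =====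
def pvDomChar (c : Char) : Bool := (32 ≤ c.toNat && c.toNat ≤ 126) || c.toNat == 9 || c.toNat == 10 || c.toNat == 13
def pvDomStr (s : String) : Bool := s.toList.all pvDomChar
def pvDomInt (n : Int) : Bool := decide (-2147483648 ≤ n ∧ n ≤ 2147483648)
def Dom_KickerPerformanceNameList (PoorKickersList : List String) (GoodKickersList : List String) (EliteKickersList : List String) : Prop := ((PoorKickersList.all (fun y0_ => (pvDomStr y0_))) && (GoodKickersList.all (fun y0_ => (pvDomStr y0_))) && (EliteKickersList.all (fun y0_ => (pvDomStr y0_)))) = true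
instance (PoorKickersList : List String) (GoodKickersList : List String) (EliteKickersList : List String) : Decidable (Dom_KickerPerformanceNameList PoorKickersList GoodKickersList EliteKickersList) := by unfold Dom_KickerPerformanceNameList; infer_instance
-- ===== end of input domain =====

-- B replaces A's max-length computation + indexed loop + try/except padding by a
-- parallel head/tail sweep of the three lists (a hand-rolled zip_longest, fill " "): simpler, same cost.

-- ===== PORT A =====
def KickerPerformanceNameList (PoorKickersList : List String) (GoodKickersList : List String) (EliteKickersList : List String) : List (List String) :=
  let kickerList : List (List String) := [PoorKickersList, GoodKickersList, EliteKickersList]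
  let table : List (List String) := [["Below -1SD", "Between -1SD and 1SD", "Above 1SD"]]
  let loops : Int :=
    if EliteKickersList.length > GoodKickersList.length ∧ EliteKickersList.length > PoorKickersList.length then (EliteKickersList.length : Int)
    else if GoodKickersList.length > PoorKickersList.length then (GoodKickersList.length : Int)
    else (PoorKickersList.length : Int)
  let res := (PySem.List.pyRange 0 loops 1).foldl (fun (st : List (List String) × Int) _ =>
      let table := st.1
      let row := st.2
      let entry : List String := []
      let entry := entry ++ [(PySem.List.pyGet? (PySem.List.pyGetD kickerList 0 []) row).getD " "]
      let entry := entry ++ [(PySem.List.pyGet? (PySem.List.pyGetD kickerList 1 []) row).getD " "]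
      let entry := entry ++ [(PySem.List.pyGet? (PySem.List.pyGetD kickerList 2 []) row).getD " "]
      (table ++ [entry], row + 1)) (table, 0)
  res.1

-- ===== PORT B =====
-- hand-rolled zip_longest over three lists, fill value " " (iterator state = remaining suffix)
def pvZipLongest3 (ps gs es : List String) : List (List String) :=
  let vals : List (Option String) := [ps.head?, gs.head?, es.head?]
  if vals.all (fun v => v.isNone) then []
  else (vals.map (fun v => v.getD " ")) :: pvZipLongest3 ps.tail gs.tail es.tail
termination_by ps.length + gs.length + es.length
decreasing_by
  rename_i h
  simp only [vals, List.all_cons, List.all_nil] at h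
  cases ps <;> cases gs <;> cases es <;> simp_all <;> omega

def KickerPerformanceNameList_alt (PoorKickersList : List String) (GoodKickersList : List String) (EliteKickersList : List String) : List (List String) :=
  let header : List String := ["Below -1SD", "Between -1SD and 1SD", "Above 1SD"]
  [header] ++ pvZipLongest3 PoorKickersList GoodKickersList EliteKickersList

-- ===== PRECONDITION & SPEC =====
def Spec_KickerPerformanceNameList (PoorKickersList : List String) (GoodKickersList : List String) (EliteKickersList : List String) (out : List (List String)) : Prop := out = KickerPerformanceNameList_alt PoorKickersList GoodKickersList EliteKickersList
instance (PoorKickersList : List String) (GoodKickersList : List String) (EliteKickersList : List String) (out : List (List String)) : Decidable (Spec_KickerPerformanceNameList PoorKickersList GoodKickersList EliteKickersList out) := by unfold Spec_KickerPerformanceNameList; infer_instance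

-- ===== CLAIM (what is proved, stated in full; the proofs are below) =====
def Claim_equal_KickerPerformanceNameList : Prop := ∀ (PoorKickersList : List String) (GoodKickersList : List String) (EliteKickersList : List String), Dom_KickerPerformanceNameList PoorKickersList GoodKickersList EliteKickersList → Spec_KickerPerformanceNameList PoorKickersList GoodKickersList EliteKickersList (KickerPerformanceNameList PoorKickersList GoodKickersList EliteKickersList)

-- ===== LEMMAS AND PROOFS =====

-- the row both programs emit for index r
def pvRow (ps gs es : List String) (r : Nat) : List String :=
  [(ps[r]?).getD " ", (gs[r]?).getD " ", (es[r]?).getD " "]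

theorem pvGetElem?_succ (l : List String) (r : Nat) : l[r+1]? = l.tail[r]? := by
  cases l <;> simp

theorem pvRow_succ (ps gs es : List String) (r : Nat) :
    pvRow ps gs es (r+1) = pvRow ps.tail gs.tail es.tail r := by
  unfold pvRow
  rw [pvGetElem?_succ, pvGetElem?_succ, pvGetElem?_succ]

theorem pvZipLongest3_eq (ps gs es : List String) :
    pvZipLongest3 ps gs es =
      (List.range (max (max ps.length gs.length) es.length)).map (pvRow ps gs es) := by
  fun_induction pvZipLongest3 ps gs es with
  | case1 ps gs es v hv =>
    simp only [v, List.all_cons, List.all_nil, Bool.and_eq_true,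
      Option.isNone_iff_eq_none, List.head?_eq_none_iff] at hv
    obtain ⟨h1, h2, h3, -⟩ := hv
    subst h1; subst h2; subst h3
    simp
  | case2 ps gs es v hv ih =>
    have htail : ∀ l : List String, l.tail.length = l.length - 1 := by
      intro l; cases l <;> simp
    have hpos : 0 < ps.length ∨ 0 < gs.length ∨ 0 < es.length := by
      simp only [v, List.all_cons, List.all_nil, Bool.and_eq_true,
        Option.isNone_iff_eq_none, List.head?_eq_none_iff] at hv
      rcases ps with _ | _ <;> rcases gs with _ | _ <;> rcases es with _ | _ <;> simp_all
    have hM : max (max ps.length gs.length) es.length =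
        max (max ps.tail.length gs.tail.length) es.tail.length + 1 := by
      rw [htail, htail, htail]; omega
    have hs : (pvRow ps gs es ∘ Nat.succ) = pvRow ps.tail gs.tail es.tail := by
      funext r; simpa using pvRow_succ ps gs es r
    rw [hM, List.range_succ_eq_map]
    conv_rhs => rw [List.map_cons, List.map_map]
    rw [hs, ← ih]
    simp [v, pvRow, List.head?_eq_getElem?]

-- A's for-loop over range(loops): appends g(row) and increments row, row starting at 0
theorem pvFoldlCounter {α : Type} (F : List α × Int → Int → List α × Int) (g : Int → α)
    (hF : ∀ st x, F st x = (st.1 ++ [g st.2], st.2 + 1)) (n : Nat) (t0 : List α) :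
    (PySem.List.pyRange 0 (n : Int) 1).foldl F (t0, 0) =
      (t0 ++ (List.range n).map (fun r => g (Int.ofNat r)), (n : Int)) := by
  induction n with
  | zero => simp [PySem.List.pyRange_one_eq_nil]
  | succ m ih =>
    have hcast : ((m + 1 : Nat) : Int) = (m : Int) + 1 := by push_cast; ring
    rw [hcast, PySem.List.pyRange_one_succ_right (by positivity), List.foldl_append, ih,
      List.foldl_cons, List.foldl_nil, hF, List.range_succ]
    simp

theorem KickerPerformanceNameList_A_eq (P G E : List String) :
    KickerPerformanceNameList P G E =
      [["Below -1SD", "Between -1SD and 1SD", "Above 1SD"]] ++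
        (List.range (max (max P.length G.length) E.length)).map (pvRow P G E) := by
  have hl : (if E.length > G.length ∧ E.length > P.length then (E.length : Int)
      else if G.length > P.length then (G.length : Int) else (P.length : Int)) =
      ((max (max P.length G.length) E.length : Nat) : Int) := by
    split_ifs <;> (rw [Int.natCast_inj]; omega)
  simp only [KickerPerformanceNameList]
  rw [hl, pvFoldlCounter _
      (fun row => (([] ++ [(PySem.List.pyGet? (PySem.List.pyGetD [P, G, E] 0 []) row).getD " "])
          ++ [(PySem.List.pyGet? (PySem.List.pyGetD [P, G, E] 1 []) row).getD " "])
          ++ [(PySem.List.pyGet? (PySem.List.pyGetD [P, G, E] 2 []) row).getD " "])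
      (fun st x => rfl)]
  dsimp only
  congr 1
  apply List.map_congr_left
  intro r _
  simp [pvRow, PySem.List.pyGetD, PySem.List.pyIdx?, PySem.List.pyGet?]
  refine ⟨?_, ?_, ?_⟩ <;> split_ifs with hlt
  case pos | pos | pos => simp
  all_goals simp [List.getElem?_eq_none (Nat.le_of_not_lt hlt)]

-- ===== VERDICT (by name: the statement is the Claim_ definition above) =====
theorem KickerPerformanceNameList_spec : Claim_equal_KickerPerformanceNameList := by
  intro P G E _
  unfold Spec_KickerPerformanceNameList KickerPerformanceNameList_alt
  rw [KickerPerformanceNameList_A_eq, pvZipLongest3_eq]
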